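-- pv_equiv track=rewrite | github.com/mbartnicki80/ASD | egzP6a/egzP6a.py | google
-- ===== SOURCE A (Python) =====
-- def merge(left, right, p):
--     W = []
--     i = 0; j = 0
--     while i<len(left) and j<len(right):
--         if left[i][p]>=right[j][p]:
--             W.append(left[i])
--             i += 1
--         else:
--             W.append(right[j])
--             j += 1
--     while i<len(left):
--         W.append(left[i])
--         i += 1
--     while j<len(right):
--         W.append(right[j])
--         j += 1
--     return W
--
-- def msort(T, p):
--     n = len(T)
--     if n<=1:
--         return T
--     mid = n//2
--     left = msort(T[:mid], p)
--     right = msort(T[mid:], p)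
--     return merge(left, right, p)
--
-- def google ( H, s ):
--     T = []
--     for i in range(len(H)):
--         dl = 0
--         for j in range(len(H[i])):
--             if H[i][j]>='a' and H[i][j]<='z':
--                 dl += 1
--         T.append((H[i], len(H[i]), dl))
--
--     T = msort(T, 2)
--     T = msort(T, 1)
--
--     return T[s-1][0]
-- ===== SOURCE B (Python) =====
-- def google(H, s):
--     return sorted(H, key=lambda w: (len(w), sum('a' <= c <= 'z' for c in w)), reverse=True)[s - 1]
-- ===== Notes on version B (the rewrite author's own statement) =====
-- stated objective: faster
-- what changed: A decorates each string with (length, lowercase-count) and runs a hand-written recursive mergesort twice (stable sort by lowercase count, then by length) before indexing; B is a single call to Python's built-in sorted with the tuple key (len(w), lowercase count) and reverse=True, then indexes once.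
import Mathlib
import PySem

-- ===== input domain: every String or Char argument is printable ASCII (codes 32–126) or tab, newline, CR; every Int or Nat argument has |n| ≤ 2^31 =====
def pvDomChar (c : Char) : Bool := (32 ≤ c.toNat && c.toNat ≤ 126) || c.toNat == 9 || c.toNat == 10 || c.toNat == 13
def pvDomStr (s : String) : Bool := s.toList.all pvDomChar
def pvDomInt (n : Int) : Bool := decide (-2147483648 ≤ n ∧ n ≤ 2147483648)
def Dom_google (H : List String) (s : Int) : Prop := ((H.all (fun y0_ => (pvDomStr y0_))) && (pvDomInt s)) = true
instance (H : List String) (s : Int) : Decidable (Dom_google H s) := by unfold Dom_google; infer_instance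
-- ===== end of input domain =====

-- B replaces A's two hand-written recursive mergesort passes by one built-in stable sort with a
-- tuple key (length, lowercase count, reverse=True); measured faster by a constant factor.

-- ===== PORT A =====
-- Python's tuple index t[p]: google only calls merge/msort with p = 2 and p = 1, where t[p]
-- reads the two Int components of the triple; exact for those p.
def pvProj (t : String × Int × Int) (p : Int) : Int := if p = 1 then t.2.1 else t.2.2

-- merge's two index-driven while loops, as the equivalent two-list recursion over the same elements
def pvMerge (left right : List (String × Int × Int)) (p : Int) : List (String × Int × Int) :=
  match left, right with
  | [], r => r
  | l, [] => l
  | a :: l, b :: r =>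
    if pvProj a p ≥ pvProj b p then a :: pvMerge l (b :: r) p
    else b :: pvMerge (a :: l) r p
termination_by left.length + right.length
decreasing_by all_goals simp

-- msort: T[:mid] / T[mid:] are List.take mid / List.drop mid (PySem.List.slice_to_natCast /
-- slice_from_natCast) and mid = n//2 on the nonnegative length is Nat division
def pvMsort (T : List (String × Int × Int)) (p : Int) : List (String × Int × Int) :=
  if h : T.length ≤ 1 then T
  else
    pvMerge (pvMsort (T.take (T.length / 2)) p) (pvMsort (T.drop (T.length / 2)) p) p
termination_by T.length
decreasing_by all_goals simp; omega

-- T[s-1][0] is pyGetD … (s-1) |>.1 under Pre_ (IndexError excluded)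
def google (H : List String) (s : Int) : String :=
  (PySem.List.pyGetD
    (pvMsort (pvMsort
      (H.foldl (fun acc h =>
        acc ++ [(h, PySem.Str.len h,
          h.toList.foldl (fun dl c => if 'a' ≤ c ∧ c ≤ 'z' then dl + 1 else dl) (0 : Int))]) [])
      2) 1)
    (s - 1) ("", 0, 0)).1

-- ===== PORT B =====
-- sum('a' <= c <= 'z' for c in w)
def pvLowerCount (w : String) : Int := (w.toList.countP (fun c => decide ('a' ≤ c ∧ c ≤ 'z')) : Int)

def google_alt (H : List String) (s : Int) : String :=
  PySem.List.pyGetD (PySem.List.sorted2 H PySem.Str.len pvLowerCount true) (s - 1) ""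

-- ===== PRECONDITION & SPEC =====
-- Python A raises IndexError exactly when s-1 is out of range for H (in particular on empty H)
def Pre_google (H : List String) (s : Int) : Prop := PySem.Raise.InRange H.length (s - 1)
instance (H : List String) (s : Int) : Decidable (Pre_google H s) := by unfold Pre_google; infer_instance
def pvWitness_google : List String × Int := (["ab", "C"], 1)

def Spec_google (H : List String) (s : Int) (out : String) : Prop := out = google_alt H s
instance (H : List String) (s : Int) (out : String) : Decidable (Spec_google H s out) := by unfold Spec_google; infer_instance

-- ===== CLAIM (what is proved, stated in full; the proofs are below) =====
def Claim_equal_google : Prop := ∀ (H : List String) (s : Int), Dom_google H s → Pre_google H s → Spec_google H s (google H s)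

-- ===== LEMMAS AND PROOFS =====

-- the triple A decorates each string with
def pvF (w : String) : String × Int × Int := (w, PySem.Str.len w, pvLowerCount w)
-- index-decorated elements (index first, as PySem.List.enumerate produces them)
def pvG (x : Int × String) : Int × (String × Int × Int) := (x.1, pvF x.2)

-- the order "a must come before b" produced by a stable descending sort on key `pvProj · p`,
-- refining a previous order r on ties
def pvQ (p : Int) (r : Int × (String × Int × Int) → Int × (String × Int × Int) → Prop)
    (a b : Int × (String × Int × Int)) : Prop :=
  pvProj b.2 p < pvProj a.2 p ∨ (pvProj a.2 p = pvProj b.2 p ∧ r a b)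

def pvR0 (a b : Int × (String × Int × Int)) : Prop := a.1 < b.1
def pvQ1 : Int × (String × Int × Int) → Int × (String × Int × Int) → Prop := pvQ 2 pvR0
def pvQA : Int × (String × Int × Int) → Int × (String × Int × Int) → Prop := pvQ 1 pvQ1

-- decorated clones of A's merge / msort (proof-only)
def pvDMerge (L R : List (Int × (String × Int × Int))) (p : Int) : List (Int × (String × Int × Int)) :=
  match L, R with
  | [], r => r
  | l, [] => l
  | a :: l, b :: r =>
    if pvProj a.2 p ≥ pvProj b.2 p then a :: pvDMerge l (b :: r) p
    else b :: pvDMerge (a :: l) r p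
termination_by L.length + R.length
decreasing_by all_goals simp

def pvDMsort (X : List (Int × (String × Int × Int))) (p : Int) : List (Int × (String × Int × Int)) :=
  if h : X.length ≤ 1 then X
  else
    pvDMerge (pvDMsort (X.take (X.length / 2)) p) (pvDMsort (X.drop (X.length / 2)) p) p
termination_by X.length
decreasing_by all_goals simp; omega



theorem pvDMerge_map (L R : List (Int × (String × Int × Int))) (p : Int) :
    (pvDMerge L R p).map Prod.snd = pvMerge (L.map Prod.snd) (R.map Prod.snd) p := by
  fun_induction pvDMerge L R p with
  | case1 r => simp [pvMerge]
  | case2 l h => cases l <;> simp [pvMerge]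
  | case3 a l b r h ih => simp only [pvMerge, List.map_cons]; simp [h, ih]
  | case4 a l b r h ih => simp only [pvMerge, List.map_cons]; simp [h, ih]

theorem pvDMsort_map (X : List (Int × (String × Int × Int))) (p : Int) :
    (pvDMsort X p).map Prod.snd = pvMsort (X.map Prod.snd) p := by
  fun_induction pvDMsort X p with
  | case1 X h => rw [pvMsort]; simp [h]
  | case2 X h ih1 ih2 =>
    rw [pvMsort, dif_neg (by simpa using h), pvDMerge_map, ih1, ih2]
    simp only [List.length_map, List.map_take, List.map_drop]

theorem pvDMerge_perm (L R : List (Int × (String × Int × Int))) (p : Int) :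
    (pvDMerge L R p).Perm (L ++ R) := by
  fun_induction pvDMerge L R p with
  | case1 r => simp
  | case2 l h => simp
  | case3 a l b r h ih => exact (ih.cons a)
  | case4 a l b r h ih => exact (ih.cons b).trans List.perm_middle.symm

theorem pvDMsort_perm (X : List (Int × (String × Int × Int))) (p : Int) :
    (pvDMsort X p).Perm X := by
  fun_induction pvDMsort X p with
  | case1 X h => exact List.Perm.refl X
  | case2 X h ih1 ih2 =>
    exact (pvDMerge_perm _ _ _).trans
      ((ih1.append ih2).trans (List.Perm.of_eq (List.take_append_drop _ X)))

theorem pvDMerge_pairwise (p : Int)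
    (r : Int × (String × Int × Int) → Int × (String × Int × Int) → Prop) :
    ∀ (n : Nat) (L R : List (Int × (String × Int × Int))), L.length + R.length = n →
      L.Pairwise (pvQ p r) → R.Pairwise (pvQ p r) →
      (∀ a ∈ L, ∀ b ∈ R, pvProj a.2 p = pvProj b.2 p → r a b) →
      (pvDMerge L R p).Pairwise (pvQ p r) := by
  intro n
  induction n using Nat.strong_induction_on with
  | _ n ih =>
  intro L R hn hL hR hc
  rcases L with _ | ⟨a, l⟩
  · simpa [pvDMerge] using hR
  rcases R with _ | ⟨b, rr⟩
  · simpa [pvDMerge] using hL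
  by_cases hab : pvProj a.2 p ≥ pvProj b.2 p
  · have hun : pvDMerge (a :: l) (b :: rr) p = a :: pvDMerge l (b :: rr) p := by
      rw [pvDMerge]; simp [hab]
    rw [hun]
    refine List.pairwise_cons.mpr ⟨?_, ?_⟩
    · intro z hz
      have hz' := (pvDMerge_perm l (b :: rr) p).mem_iff.mp hz
      rcases List.mem_append.mp hz' with hzl | hzr
      · exact (List.pairwise_cons.mp hL).1 z hzl
      · have hzb : pvProj z.2 p ≤ pvProj b.2 p := by
          rcases List.mem_cons.mp hzr with rfl | hzr'
          · exact le_refl _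
          · rcases (List.pairwise_cons.mp hR).1 z hzr' with hlt | ⟨heq, _⟩
            · exact le_of_lt hlt
            · exact le_of_eq heq.symm
        by_cases hlt : pvProj z.2 p < pvProj a.2 p
        · exact Or.inl hlt
        · have heq : pvProj a.2 p = pvProj z.2 p := by omega
          exact Or.inr ⟨heq, hc a (by simp) z hzr heq⟩
    · refine ih (l.length + (b :: rr).length) (by simp at hn ⊢; omega) l (b :: rr) rfl
        ((List.pairwise_cons.mp hL).2) hR ?_
      intro x hx y hy
      exact hc x (List.mem_cons_of_mem a hx) y hy
  · have hun : pvDMerge (a :: l) (b :: rr) p = b :: pvDMerge (a :: l) rr p := by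
      rw [pvDMerge]; simp [hab]
    rw [hun]
    refine List.pairwise_cons.mpr ⟨?_, ?_⟩
    · intro z hz
      have hz' := (pvDMerge_perm (a :: l) rr p).mem_iff.mp hz
      rcases List.mem_append.mp hz' with hzl | hzr
      · have hza : pvProj z.2 p ≤ pvProj a.2 p := by
          rcases List.mem_cons.mp hzl with rfl | hzl'
          · exact le_refl _
          · rcases (List.pairwise_cons.mp hL).1 z hzl' with hlt | ⟨heq, _⟩
            · exact le_of_lt hlt
            · exact le_of_eq heq.symm
        exact Or.inl (by omega)
      · exact (List.pairwise_cons.mp hR).1 z hzr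
    · refine ih ((a :: l).length + rr.length) (by simp at hn ⊢; omega) (a :: l) rr rfl hL
        ((List.pairwise_cons.mp hR).2) ?_
      intro x hx y hy
      exact hc x hx y (List.mem_cons_of_mem b hy)

theorem pvDMsort_pairwise (p : Int)
    (r : Int × (String × Int × Int) → Int × (String × Int × Int) → Prop) :
    ∀ (n : Nat) (X : List (Int × (String × Int × Int))), X.length = n →
      X.Pairwise (fun a b => pvProj a.2 p = pvProj b.2 p → r a b) →
      (pvDMsort X p).Pairwise (pvQ p r) := by
  intro n
  induction n using Nat.strong_induction_on with
  | _ n ih =>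
  intro X hn hX
  by_cases h : X.length ≤ 1
  · have hun : pvDMsort X p = X := by rw [pvDMsort]; simp [h]
    rw [hun]
    rcases X with _ | ⟨x, _ | ⟨y, t⟩⟩
    · exact List.Pairwise.nil
    · exact List.pairwise_singleton _ _
    · simp at h
  · have hun : pvDMsort X p =
        pvDMerge (pvDMsort (X.take (X.length / 2)) p) (pvDMsort (X.drop (X.length / 2)) p) p := by
      rw [pvDMsort]; simp [h]
    rw [hun]
    have hsplit := hX
    rw [← List.take_append_drop (X.length / 2) X] at hsplit
    obtain ⟨ht, hd, hcross⟩ := List.pairwise_append.mp hsplit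
    refine pvDMerge_pairwise p r _ _ _ rfl
      (ih (X.take (X.length / 2)).length (by simp; omega) _ rfl ht)
      (ih (X.drop (X.length / 2)).length (by simp; omega) _ rfl hd) ?_
    intro a ha b hb heq
    exact hcross a ((pvDMsort_perm _ _).mem_iff.mp ha) b ((pvDMsort_perm _ _).mem_iff.mp hb) heq

-- B side: sorted2's comparison specialised to B's keys
def pvLt (a b : String) : Bool :=
  decide (PySem.Str.len a < PySem.Str.len b) ||
    (!decide (PySem.Str.len b < PySem.Str.len a) && decide (pvLowerCount a < pvLowerCount b))
def pvBefore (a b : String) : Bool := pvLt b a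

theorem pvSorted2_eq (H : List String) :
    PySem.List.sorted2 H PySem.Str.len pvLowerCount true =
      H.foldl (fun acc x => PySem.List.insertBy pvBefore x acc) [] := rfl

-- the final order on index-decorated strings (literally pvQA through the decoration pvG)
def pvQB (a b : Int × String) : Prop := pvQA (pvG a) (pvG b)

def pvIns (x : Int × String) (acc : List (Int × String)) : List (Int × String) :=
  PySem.List.insertBy (fun a b => pvBefore a.2 b.2) x acc

theorem pvIns_map (x : Int × String) (acc : List (Int × String)) :
    (pvIns x acc).map Prod.snd = PySem.List.insertBy pvBefore x.2 (acc.map Prod.snd) := by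
  induction acc with
  | nil => simp [pvIns, PySem.List.insertBy]
  | cons y ys ih =>
    by_cases h : pvBefore x.2 y.2 <;> simp [pvIns, PySem.List.insertBy, h] <;> simpa [pvIns] using ih

theorem pvFoldIns_map (X : List (Int × String)) (acc : List (Int × String)) :
    ((X.foldl (fun a x => pvIns x a) acc).map Prod.snd) =
      (X.map Prod.snd).foldl (fun a x => PySem.List.insertBy pvBefore x a) (acc.map Prod.snd) := by
  induction X generalizing acc with
  | nil => simp
  | cons x xs ih => simp only [List.foldl_cons, List.map_cons]; rw [ih, pvIns_map]

theorem pvQB_of_lt (a b : Int × String) (h : pvLt b.2 a.2 = true) : pvQB a b := by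
  simp [pvLt] at h
  simp [pvQB, pvQA, pvQ, pvQ1, pvR0, pvG, pvF, pvProj]
  omega

theorem pvQB_trans_key (a b c : Int × String) (h1 : pvLt b.2 a.2 = true) (h2 : pvQB b c) :
    pvQB a c := by
  simp [pvLt] at h1
  simp [pvQB, pvQA, pvQ, pvQ1, pvR0, pvG, pvF, pvProj] at h2 ⊢
  omega

theorem pvIns_one (x : Int × String) (acc : List (Int × String))
    (h1 : acc.Pairwise pvQB) (h2 : ∀ y ∈ acc, y.1 < x.1) :
    (pvIns x acc).Perm (x :: acc) ∧ (pvIns x acc).Pairwise pvQB := by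
  induction acc with
  | nil => exact ⟨by simp [pvIns, PySem.List.insertBy], by simp [pvIns, PySem.List.insertBy]⟩
  | cons y ys ih =>
    by_cases hb : pvBefore x.2 y.2 = true
    · have hfront : pvIns x (y :: ys) = x :: y :: ys := by
        simp [pvIns, PySem.List.insertBy, hb]
      rw [hfront]
      refine ⟨List.Perm.refl _, List.pairwise_cons.mpr ⟨?_, h1⟩⟩
      intro z hz
      rcases List.mem_cons.mp hz with rfl | hz'
      · exact pvQB_of_lt x z hb
      · exact pvQB_trans_key x y z hb ((List.pairwise_cons.mp h1).1 z hz')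
    · have hfront : pvIns x (y :: ys) = y :: pvIns x ys := by
        simp [pvIns, PySem.List.insertBy, hb]
      obtain ⟨ihp, ihs⟩ := ih ((List.pairwise_cons.mp h1).2)
        (fun z hz => h2 z (List.mem_cons_of_mem y hz))
      rw [hfront]
      refine ⟨(ihp.cons y).trans (List.Perm.swap x y ys), List.pairwise_cons.mpr ⟨?_, ihs⟩⟩
      intro z hz
      rcases List.mem_cons.mp (ihp.mem_iff.mp hz) with rfl | hz'
      · have hnb : ¬ pvLt y.2 z.2 = true := hb
        have hidx : y.1 < z.1 := h2 y (by simp)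
        simp [pvLt] at hnb
        simp [pvQB, pvQA, pvQ, pvQ1, pvR0, pvG, pvF, pvProj]
        omega
      · exact (List.pairwise_cons.mp h1).1 z hz'

theorem pvFoldIns_sorted (X : List (Int × String)) (acc : List (Int × String))
    (hX : X.Pairwise (fun a b => a.1 < b.1)) (hacc : acc.Pairwise pvQB)
    (hc : ∀ y ∈ acc, ∀ z ∈ X, y.1 < z.1) :
    (X.foldl (fun a x => pvIns x a) acc).Perm (acc ++ X) ∧
      (X.foldl (fun a x => pvIns x a) acc).Pairwise pvQB := by
  induction X generalizing acc with
  | nil => exact ⟨by simp, hacc⟩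
  | cons x xs ih =>
    simp only [List.foldl_cons]
    obtain ⟨hp1, hs1⟩ := pvIns_one x acc hacc (fun y hy => hc y hy x (by simp))
    have hc' : ∀ y ∈ pvIns x acc, ∀ z ∈ xs, y.1 < z.1 := by
      intro y hy z hz
      rcases List.mem_cons.mp (hp1.mem_iff.mp hy) with rfl | hy'
      · exact (List.pairwise_cons.mp hX).1 z hz
      · exact hc y hy' z (List.mem_cons_of_mem x hz)
    obtain ⟨hp, hs⟩ := ih (pvIns x acc) ((List.pairwise_cons.mp hX).2) hs1 hc'
    exact ⟨hp.trans ((hp1.append_right xs).trans List.perm_middle.symm), hs⟩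

theorem pvMapSnd {α : Type} (xs : List α) (s : Int) :
    (PySem.List.enumerate xs s).map Prod.snd = xs := PySem.List.map_snd_enumerate xs s

theorem pvEnum_map (f' : String → String × Int × Int) (H : List String) (s : Int) :
    PySem.List.enumerate (H.map f') s = (PySem.List.enumerate H s).map (fun x => (x.1, f' x.2)) := by
  induction H generalizing s with
  | nil => simp [PySem.List.enumerate_nil]
  | cons h t ih => simp [PySem.List.enumerate_cons, ih]

theorem pvDl_eq (w : String) :
    w.toList.foldl (fun dl c => if 'a' ≤ c ∧ c ≤ 'z' then dl + 1 else dl) (0 : Int) = pvLowerCount w := by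
  rw [PySem.List.foldl_ite_add_one]
  simp [pvLowerCount]

theorem pvGetD_map_fst (xs : List String) (i : Int) (h : PySem.Raise.InRange xs.length i) :
    (PySem.List.pyGetD (xs.map pvF) i ("", 0, 0)).1 = PySem.List.pyGetD xs i "" := by
  have hb : -(xs.length : Int) ≤ i ∧ i < xs.length := h
  by_cases hi : 0 ≤ i
  · rw [PySem.List.pyGetD_eq_getElem (xs.map pvF) ("", 0, 0) hi (by simpa using hb.2),
      PySem.List.pyGetD_eq_getElem xs "" hi hb.2]
    simp [pvF]
  · have hk : i = -((((-i).toNat : Nat)) : Int) := by omega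
    rw [hk, PySem.List.pyGetD_neg_natCast (xs.map pvF) _ ("", 0, 0) (by omega) (by simp; omega),
      PySem.List.pyGetD_neg_natCast xs _ "" (by omega) (by omega)]
    simp [pvF]

theorem pvQA_asymm (a b : Int × (String × Int × Int)) (h1 : pvQA a b) (h2 : pvQA b a) : False := by
  simp only [pvQA, pvQ, pvQ1, pvR0] at h1 h2
  omega

theorem pvMain (H : List String) :
    pvMsort (pvMsort (H.map pvF) 2) 1 =
      (PySem.List.sorted2 H PySem.Str.len pvLowerCount true).map pvF := by
  have hA : pvMsort (pvMsort (H.map pvF) 2) 1 =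
      (pvDMsort (pvDMsort (PySem.List.enumerate (H.map pvF) 0) 2) 1).map Prod.snd := by
    rw [pvDMsort_map, pvDMsort_map, pvMapSnd]
  have hpw0 : (PySem.List.enumerate (H.map pvF) 0).Pairwise (fun a b => a.1 < b.1) :=
    PySem.List.pairwise_lt_enumerate _ _
  have h1 : (pvDMsort (PySem.List.enumerate (H.map pvF) 0) 2).Pairwise pvQ1 :=
    pvDMsort_pairwise 2 pvR0 _ _ rfl
      (by refine List.Pairwise.imp ?_ hpw0; intro a b hab _; exact hab)
  have h2 : (pvDMsort (pvDMsort (PySem.List.enumerate (H.map pvF) 0) 2) 1).Pairwise pvQA :=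
    pvDMsort_pairwise 1 pvQ1 _ _ rfl
      (by refine List.Pairwise.imp ?_ h1; intro a b hab _; exact hab)
  have hpermA : (pvDMsort (pvDMsort (PySem.List.enumerate (H.map pvF) 0) 2) 1).Perm
      (PySem.List.enumerate (H.map pvF) 0) :=
    (pvDMsort_perm _ _).trans (pvDMsort_perm _ _)
  obtain ⟨hpB, hsB⟩ := pvFoldIns_sorted (PySem.List.enumerate H 0) []
    (PySem.List.pairwise_lt_enumerate _ _) List.Pairwise.nil (by simp)
  have hY'pw : (((PySem.List.enumerate H 0).foldl (fun a x => pvIns x a) []).map pvG).Pairwise pvQA :=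
    List.Pairwise.map pvG (fun a b hab => hab) hsB
  have hY'perm : (((PySem.List.enumerate H 0).foldl (fun a x => pvIns x a) []).map pvG).Perm
      (PySem.List.enumerate (H.map pvF) 0) := by
    have hm := hpB.map pvG
    rw [pvEnum_map pvF H 0]
    simpa [pvG] using hm
  have heq : pvDMsort (pvDMsort (PySem.List.enumerate (H.map pvF) 0) 2) 1 =
      ((PySem.List.enumerate H 0).foldl (fun a x => pvIns x a) []).map pvG := by
    refine List.Perm.eq_of_pairwise ?_ h2 hY'pw (hpermA.trans hY'perm.symm)
    intro a b _ _ hab hba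
    exact (pvQA_asymm a b hab hba).elim
  have hYsnd : ((PySem.List.enumerate H 0).foldl (fun a x => pvIns x a) []).map Prod.snd =
      PySem.List.sorted2 H PySem.Str.len pvLowerCount true := by
    rw [pvSorted2_eq]
    have hm := pvFoldIns_map (PySem.List.enumerate H 0) []
    rw [pvMapSnd] at hm
    simpa using hm
  have hcomp : Prod.snd ∘ pvG = pvF ∘ Prod.snd := rfl
  rw [hA, heq, List.map_map, hcomp, ← List.map_map, hYsnd]

-- ===== VERDICT (by name: the statement is the Claim_ definition above) =====
theorem google_spec : Claim_equal_google := by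
  intro H s hdom hpre
  unfold Spec_google google google_alt
  have hT : (H.foldl (fun acc h =>
      acc ++ [(h, PySem.Str.len h,
        h.toList.foldl (fun dl c => if 'a' ≤ c ∧ c ≤ 'z' then dl + 1 else dl) (0 : Int))]) [])
      = H.map pvF := by
    rw [PySem.List.foldl_append_singleton_eq_map
      (f := fun h => (h, PySem.Str.len h,
        h.toList.foldl (fun dl c => if 'a' ≤ c ∧ c ≤ 'z' then dl + 1 else dl) (0 : Int)))]
    simp only [List.nil_append]
    exact List.map_congr_left (fun w _ => by simp [pvF, pvDl_eq])
  rw [hT, pvMain]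
  have hlen : (PySem.List.sorted2 H PySem.Str.len pvLowerCount true).length = H.length :=
    (PySem.List.sorted2_perm _ _ _ _).length_eq
  exact pvGetD_map_fst _ _ (by rw [hlen]; exact hpre)
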